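-- pv_equiv track=rewrite | github.com/pypi-data/pypi-mirror-309 | packages/arbori/arbori-0.2.0.tar.gz/arbori-0.2.0/arbori/io.py | parse_input_file
-- ===== SOURCE A (Python) =====
-- def parse_input_file(input_content):
--     lines = [line for line in input_content.splitlines() if line.strip()]
--     if not lines:
--         raise ValueError("Input content is empty or only contains whitespace.")
--     indent = -1
--     indent_set = False
--     for line in lines:
--         length = len(line)
--         stripped_length = len(line.lstrip())
--         # Check for nested directory via detecting indent
--         if length != stripped_length:
--             if not indent_set:
--                 # Set indent level based on first indented line
--                 indent = length - stripped_length
--                 indent_set = True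
--             if (length - stripped_length) % indent != 0:
--                 # Raise error if indent level is not consistent
--                 raise ValueError(f"Line has incorrect indentation: {line}")
--     # Update lines to strip extra spaces so 1 space = 1 level
--     indent_corrected_lines = [
--         f"{' ' * ((len(line) - len(line.lstrip())) // indent)}{line.lstrip()}"
--         for line in lines
--     ]
--     return indent_corrected_lines
-- ===== SOURCE B (Python) =====
-- def _gcd(a, b):
--     while b:
--         a, b = b, a % b
--     return a
--
--
-- def parse_input_file(input_content):
--     lines = [line for line in input_content.splitlines() if line.strip()]
--     if not lines:
--         raise ValueError("Input content is empty or only contains whitespace.")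
--     widths = [len(line) - len(line.lstrip()) for line in lines]
--     unit = 0
--     for w in widths:
--         unit = _gcd(unit, w)
--     return [' ' * (w // unit if unit else 0) + line.lstrip()
--             for w, line in zip(widths, lines)]
-- ===== Notes on version B (the rewrite author's own statement) =====
-- stated objective: alternative
-- what changed: B computes the normalization unit as the GCD of all indentation widths (Euclid's algorithm folded over the width list) instead of A's scheme of taking the first indented line's width and validating every width against it; under A's consistency condition the gcd equals that first width, so no validation loop is needed and the levels are w // gcd.
import Mathlib
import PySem

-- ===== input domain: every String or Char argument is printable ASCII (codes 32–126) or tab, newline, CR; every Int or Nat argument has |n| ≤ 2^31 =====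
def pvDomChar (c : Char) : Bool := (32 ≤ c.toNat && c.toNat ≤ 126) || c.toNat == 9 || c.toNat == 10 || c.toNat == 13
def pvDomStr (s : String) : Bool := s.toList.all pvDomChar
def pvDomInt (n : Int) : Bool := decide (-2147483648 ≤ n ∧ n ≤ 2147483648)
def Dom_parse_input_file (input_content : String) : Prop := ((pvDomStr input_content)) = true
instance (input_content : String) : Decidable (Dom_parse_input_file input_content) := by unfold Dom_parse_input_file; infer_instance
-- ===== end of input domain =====

-- B computes the normalization unit as the GCD of all indentation widths (Euclid folded over
-- the width list) instead of A's find-first-then-validate scheme; objective: alternative.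

-- ===== PORT A =====
-- the non-blank lines A works on
def pvLines (input_content : String) : List String :=
  (PySem.Str.splitlines input_content).filter (fun line => PySem.Str.strip line ≠ "")

-- A's validation loop; state (indent, indent_set), none = ValueError raised
def pvLoopA (st : Option (Int × Bool)) (line : String) : Option (Int × Bool) :=
  match st with
  | none => none
  | some (indent, indent_set) =>
    let length : Int := PySem.Str.len line
    let stripped_length : Int := PySem.Str.len (PySem.Str.lstrip line)
    if length ≠ stripped_length then
      let indent := if !indent_set then length - stripped_length else indent
      let indent_set := true
      if PySem.Int.mod (length - stripped_length) indent ≠ 0 then none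
      else some (indent, indent_set)
    else some (indent, indent_set)

-- body of A's final list comprehension
def pvNorm (indent : Int) (line : String) : String :=
  String.mk (List.replicate
      (PySem.Int.floordiv (PySem.Str.len line - PySem.Str.len (PySem.Str.lstrip line)) indent).toNat ' '
    ++ (PySem.Str.lstrip line).toList)

def parse_input_file (input_content : String) : List String :=
  match (pvLines input_content).foldl pvLoopA (some (-1, false)) with
  | none => []      -- A raises ValueError here; empty `lines` also raises, reaching the (empty) map below
  | some (indent, _) => (pvLines input_content).map (pvNorm indent)

-- ===== PORT B =====
-- Source B's hand-written Euclid `_gcd` (Python `while b: a, b = b, a % b`)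
def pvGcd (a b : Int) : Int :=
  if h : b = 0 then a else pvGcd b (PySem.Int.mod a b)
termination_by b.natAbs
decreasing_by
  rcases lt_or_gt_of_ne h with hb | hb
  · have := PySem.Int.mod_neg_bounds a hb; omega
  · have h1 := PySem.Int.mod_nonneg a hb; have h2 := PySem.Int.mod_lt a hb; omega

-- indentation width of one line
def pvIndWidth (line : String) : Int := PySem.Str.len line - PySem.Str.len (PySem.Str.lstrip line)

def parse_input_file_alt (input_content : String) : List String :=
  let lines := (PySem.Str.splitlines input_content).filter (fun line => PySem.Str.strip line ≠ "")
  if lines = [] then []      -- Source B raises ValueError here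
  else
    let widths := lines.map pvIndWidth
    let unit := widths.foldl pvGcd 0
    (widths.zip lines).map (fun wl =>
      String.mk (List.replicate (if unit ≠ 0 then (PySem.Int.floordiv wl.1 unit).toNat else 0) ' '
        ++ (PySem.Str.lstrip wl.2).toList))

-- ===== PRECONDITION & SPEC =====
-- Pre_ excludes exactly the inputs on which A raises ValueError: no non-blank line at all, or
-- some line's indentation width not a multiple of the first indented line's width.
def Pre_parse_input_file (input_content : String) : Prop :=
  let lines := (PySem.Str.splitlines input_content).filter (fun line => PySem.Str.strip line ≠ "")
  lines ≠ [] ∧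
  ∀ line ∈ lines,
    PySem.Int.mod (pvIndWidth line)
      (((lines.map pvIndWidth).find? (fun i => i ≠ 0)).getD (-1)) = 0
instance (input_content : String) : Decidable (Pre_parse_input_file input_content) := by
  unfold Pre_parse_input_file; infer_instance

def pvWitness_parse_input_file : String := "a\n  b\n    c"

def Spec_parse_input_file (input_content : String) (out : List String) : Prop :=
  out = parse_input_file_alt input_content
instance (input_content : String) (out : List String) : Decidable (Spec_parse_input_file input_content out) := by
  unfold Spec_parse_input_file; infer_instance

-- ===== CLAIM (what is proved, stated in full; the proofs are below) =====
def Claim_equal_parse_input_file : Prop := ∀ (input_content : String), Dom_parse_input_file input_content → Pre_parse_input_file input_content → Spec_parse_input_file input_content (parse_input_file input_content)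

-- ===== LEMMAS AND PROOFS =====

theorem ind_nonneg (line : String) : 0 ≤ pvIndWidth line := by
  have h : (PySem.Str.lstrip line).toList.length ≤ line.toList.length := by
    rw [PySem.Str.toList_lstrip]
    simpa [PySem.Chars.lstrip] using List.length_dropWhile_le _ _
  simp only [pvIndWidth, PySem.Str.len]
  omega

-- width-zero test matches A's `length != stripped_length`
theorem width_zero_iff (l : String) :
    pvIndWidth l = 0 ↔ PySem.Str.len l = PySem.Str.len (PySem.Str.lstrip l) := by
  unfold pvIndWidth; omega

-- step lemmas for A's loop
theorem stepA_eq (l : String) (st : Int × Bool) (h : pvIndWidth l = 0) :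
    pvLoopA (some st) l = some st := by
  obtain ⟨i, b⟩ := st
  have h' : l.length = (PySem.Chars.lstrip l.toList).length := by
    have := (width_zero_iff l).mp h; simpa using this
  simp [pvLoopA, h']

theorem stepA_unset (l : String) (i : Int) (h : pvIndWidth l ≠ 0) :
    pvLoopA (some (i, false)) l = some (pvIndWidth l, true) := by
  have h' : ¬ l.length = (PySem.Chars.lstrip l.toList).length := by
    intro hc; exact h ((width_zero_iff l).mpr (by simpa using hc))
  simp [pvLoopA, pvIndWidth, h', PySem.Int.mod_eq_zero_iff_dvd]

theorem stepA_set_ok (l : String) (i : Int) (h : pvIndWidth l ≠ 0)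
    (hm : PySem.Int.mod (pvIndWidth l) i = 0) :
    pvLoopA (some (i, true)) l = some (i, true) := by
  have h' : ¬ l.length = (PySem.Chars.lstrip l.toList).length := by
    intro hc; exact h ((width_zero_iff l).mpr (by simpa using hc))
  have hm' : PySem.Int.mod ((l.length : Int) - ((PySem.Chars.lstrip l.toList).length : Int)) i = 0 := by
    simpa [pvIndWidth, PySem.Str.len] using hm
  simp [pvLoopA, h', hm']

-- A's loop after the indent is set: consistent widths leave the state unchanged
theorem loopA_set (lines : List String) (d : Int)
    (hm : ∀ l ∈ lines, PySem.Int.mod (pvIndWidth l) d = 0) :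
    lines.foldl pvLoopA (some (d, true)) = some (d, true) := by
  induction lines with
  | nil => rfl
  | cons l t ih =>
    by_cases hz : pvIndWidth l = 0
    · rw [List.foldl_cons, stepA_eq l _ hz]; exact ih fun x hx => hm x (by simp [hx])
    · rw [List.foldl_cons, stepA_set_ok l d hz (hm l (by simp))]
      exact ih fun x hx => hm x (by simp [hx])

-- A's whole loop, under consistency wrt the first nonzero width
theorem loopA_main (lines : List String)
    (hm : ∀ l ∈ lines, PySem.Int.mod (pvIndWidth l)
      (((lines.map pvIndWidth).find? (fun i => i ≠ 0)).getD (-1)) = 0) :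
    lines.foldl pvLoopA (some (-1, false)) =
      some ((((lines.map pvIndWidth).find? (fun i => i ≠ 0)).getD (-1)),
        (((lines.map pvIndWidth).find? (fun i => i ≠ 0)).isSome)) := by
  induction lines with
  | nil => rfl
  | cons l t ih =>
    by_cases hz : pvIndWidth l = 0
    · have hf : ((l :: t).map pvIndWidth).find? (fun i => i ≠ 0)
          = (t.map pvIndWidth).find? (fun i => i ≠ 0) := by
        simp [List.find?, hz]
      rw [hf] at hm ⊢
      rw [List.foldl_cons, stepA_eq l _ hz]
      exact ih fun x hx => hm x (by simp [hx])
    · have hf : ((l :: t).map pvIndWidth).find? (fun i => i ≠ 0) = some (pvIndWidth l) := by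
        simp [List.find?, hz]
      rw [hf] at hm ⊢
      rw [List.foldl_cons, stepA_unset l _ hz]
      simpa using loopA_set t (pvIndWidth l) fun x hx => hm x (by simp [hx])

-- gcd lemmas for B
theorem gcd_zero (a : Int) : pvGcd a 0 = a := by rw [pvGcd]; simp

theorem gcd_self_dvd (d w : Int) (hd : 0 < d) (hw : 0 ≤ w) (hdvd : d ∣ w) :
    pvGcd d w = d := by
  rcases eq_or_lt_of_le hw with hw0 | hwpos
  · rw [← hw0, gcd_zero]
  · have hmw : PySem.Int.mod w d = 0 := (PySem.Int.mod_eq_zero_iff_dvd w d).mpr hdvd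
    have hdw : d ≤ w := Int.le_of_dvd hwpos hdvd
    rcases eq_or_lt_of_le hdw with heq | hlt
    · rw [pvGcd]
      simp only [dif_neg (by omega : ¬ w = 0)]
      rw [heq] at hmw ⊢
      rw [hmw, gcd_zero]
    · have hmd : PySem.Int.mod d w = d := by
        rw [PySem.Int.mod_eq_emod_of_pos hwpos, Int.emod_eq_of_lt (le_of_lt hd) hlt]
      rw [pvGcd]
      simp only [dif_neg (by omega : ¬ w = 0)]
      rw [hmd, pvGcd]
      simp only [dif_neg (by omega : ¬ d = 0)]
      rw [hmw, gcd_zero]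

-- B's gcd fold after the unit is established
theorem gcdfold_set (ws : List Int) (d : Int) (hd : 0 < d)
    (h : ∀ w ∈ ws, 0 ≤ w ∧ d ∣ w) : ws.foldl pvGcd d = d := by
  induction ws with
  | nil => rfl
  | cons w t ih =>
    obtain ⟨hw, hdvd⟩ := h w (by simp)
    rw [List.foldl_cons, gcd_self_dvd d w hd hw hdvd]
    exact ih fun x hx => h x (by simp [hx])

-- B's whole gcd fold from 0, under the same consistency hypothesis
theorem gcdfold_main (ws : List Int)
    (hnn : ∀ w ∈ ws, 0 ≤ w)
    (hm : ∀ w ∈ ws, ((ws.find? (fun i => i ≠ 0)).getD (-1)) ∣ w) :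
    ws.foldl pvGcd 0 = ((ws.find? (fun i => i ≠ 0)).getD 0) := by
  induction ws with
  | nil => rfl
  | cons w t ih =>
    by_cases hz : w = 0
    · have hf : ∀ (z : Int), ((w :: t).find? (fun i => i ≠ 0)).getD z
          = (t.find? (fun i => i ≠ 0)).getD z := by
        intro z; simp [List.find?, hz]
      rw [hf] at ⊢
      rw [List.foldl_cons, hz, gcd_zero]
      refine ih (fun x hx => hnn x (by simp [hx])) (fun x hx => ?_)
      have := hm x (by simp [hx]); rwa [hf] at this
    · have hf : (w :: t).find? (fun i => i ≠ 0) = some w := by simp [List.find?, hz]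
      rw [hf] at hm ⊢
      have hwpos : 0 < w := lt_of_le_of_ne (hnn w (by simp)) (Ne.symm hz)
      have h0w : pvGcd 0 w = w := by
        rw [pvGcd]
        simp only [dif_neg hz]
        have : PySem.Int.mod 0 w = 0 := (PySem.Int.mod_eq_zero_iff_dvd 0 w).mpr (dvd_zero w)
        rw [this, gcd_zero]
      rw [List.foldl_cons, h0w]
      simpa using gcdfold_set t w hwpos fun x hx =>
        ⟨hnn x (by simp [hx]), by simpa using hm x (by simp [hx])⟩

-- zip of a mapped list against its source, mapped
theorem zip_map_self {α β γ : Type} (g : α → β) (f : β × α → γ) (xs : List α) :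
    ((xs.map g).zip xs).map f = xs.map (fun x => f (g x, x)) := by
  induction xs with
  | nil => rfl
  | cons x t ih => simp [ih]

-- unindented lines are normalized to the bare stripped line whatever indent is used
theorem pvNorm_zero (l : String) (j : Int) (h : pvIndWidth l = 0) :
    pvNorm j l = String.mk (PySem.Str.lstrip l).toList := by
  unfold pvNorm
  rw [show PySem.Str.len l - PySem.Str.len (PySem.Str.lstrip l) = 0 from by
    have := h; unfold pvIndWidth at this; omega]
  simp [PySem.Int.floordiv, Int.zero_fdiv]

-- ===== VERDICT (by name: the statement is the Claim_ definition above) =====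
theorem parse_input_file_spec : Claim_equal_parse_input_file := by
  intro s _ hpre
  obtain ⟨hne, hmod⟩ := hpre
  unfold Spec_parse_input_file parse_input_file parse_input_file_alt
  simp only []
  set lines := (PySem.Str.splitlines s).filter (fun line => PySem.Str.strip line ≠ "") with hl
  have hlines : pvLines s = lines := rfl
  rw [hlines, if_neg hne]
  rw [loopA_main lines hmod]
  rw [zip_map_self pvIndWidth _ lines]
  cases hF : (lines.map pvIndWidth).find? (fun i => i ≠ 0) with
  | none =>
    -- no indented line: A divides 0 by -1, B pads with zero spaces
    have hz : ∀ l ∈ lines, pvIndWidth l = 0 := by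
      intro l hlmem
      have := List.find?_eq_none.mp hF (pvIndWidth l) (List.mem_map_of_mem hlmem)
      simpa using this
    have hu : (lines.map pvIndWidth).foldl pvGcd 0 = 0 := by
      have := gcdfold_main (lines.map pvIndWidth)
        (by intro w hw; obtain ⟨l, hlmem, rfl⟩ := List.mem_map.mp hw; exact ind_nonneg l)
        (by intro w hw; obtain ⟨l, hlmem, rfl⟩ := List.mem_map.mp hw
            rw [hF]; simpa using ⟨l, hlmem, (hz l hlmem).symm⟩ ▸ dvd_refl _)
      rw [hF] at this; simpa using this
    rw [hu]
    show List.map (pvNorm (-1)) lines = _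
    apply List.map_congr_left
    intro l hlmem
    rw [pvNorm_zero l (-1) (hz l hlmem)]
    simp
  | some d =>
    have hdne : d ≠ 0 := by simpa using List.find?_some hF
    have hdmem : ∃ l ∈ lines, pvIndWidth l = d := by
      obtain ⟨l, hlmem, he⟩ := List.mem_map.mp (List.mem_of_find?_eq_some hF)
      exact ⟨l, hlmem, he⟩
    have hdpos : 0 < d := by
      obtain ⟨l, _, he⟩ := hdmem
      have := ind_nonneg l; omega
    have hdvd : ∀ w ∈ lines.map pvIndWidth, d ∣ w := by
      intro w hw
      obtain ⟨l, hlmem, rfl⟩ := List.mem_map.mp hw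
      have := hmod l hlmem
      rw [hF] at this
      exact (PySem.Int.mod_eq_zero_iff_dvd _ _).mp (by simpa using this)
    have hu : (lines.map pvIndWidth).foldl pvGcd 0 = d := by
      have := gcdfold_main (lines.map pvIndWidth)
        (by intro w hw; obtain ⟨l, _, rfl⟩ := List.mem_map.mp hw; exact ind_nonneg l)
        (by intro w hw; rw [hF]; simpa using hdvd w hw)
      rw [hF] at this; simpa using this
    rw [hu]
    show List.map (pvNorm d) lines = _
    apply List.map_congr_left
    intro l _
    simp [pvNorm, pvIndWidth, hdne]
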